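-- pv_equiv track=rewrite | github.com/yktsnet/dotfiles-public | apps/lpt/core/systemd_overview.py | merge_root_timers
-- ===== SOURCE A (Python) =====
-- from collections import defaultdict
--
-- def merge_root_timers(remote, local):
--     merged = {}
--     for src in (remote, local):
--         for root, timers in src.items():
--             dst = merged.setdefault(root, defaultdict(set))
--             for name, devs in timers.items():
--                 dst[name].update(devs)
--     return merged
-- ===== SOURCE B (Python) =====
-- def _copy(v):
--     # deep copy: dicts recursively, leaf sets freshly rebuilt (never aliased)
--     return {k: _copy(w) for k, w in v.items()} if isinstance(v, dict) else set(v)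
--
--
-- def _deep_merge(a, b):
--     out = {}
--     for k, v in a.items():
--         if k in b:
--             w = b[k]
--             out[k] = _deep_merge(v, w) if isinstance(v, dict) else set(v) | w
--         else:
--             out[k] = _copy(v)
--     for k, v in b.items():
--         if k not in a:
--             out[k] = _copy(v)
--     return out
--
--
-- def merge_root_timers(remote, local):
--     return _deep_merge(remote, local)
-- ===== Notes on version B (the rewrite author's own statement) =====
-- stated objective: alternative
-- what changed: Replaces A's three fixed-depth mutation loops (setdefault into a shared accumulator plus defaultdict-set updates) with a generic recursive deep_merge that builds a fresh dict per level: keys of the left operand merged with the right by recursion on dicts and set union on leaves, then the right operand's new keys appended; inputs are never mutated. Pre_ only pins the Lean encoding (association lists/element lists must have distinct keys/elements to actually represent Python dicts/sets); no Python-representable input is excluded.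
import Mathlib
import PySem

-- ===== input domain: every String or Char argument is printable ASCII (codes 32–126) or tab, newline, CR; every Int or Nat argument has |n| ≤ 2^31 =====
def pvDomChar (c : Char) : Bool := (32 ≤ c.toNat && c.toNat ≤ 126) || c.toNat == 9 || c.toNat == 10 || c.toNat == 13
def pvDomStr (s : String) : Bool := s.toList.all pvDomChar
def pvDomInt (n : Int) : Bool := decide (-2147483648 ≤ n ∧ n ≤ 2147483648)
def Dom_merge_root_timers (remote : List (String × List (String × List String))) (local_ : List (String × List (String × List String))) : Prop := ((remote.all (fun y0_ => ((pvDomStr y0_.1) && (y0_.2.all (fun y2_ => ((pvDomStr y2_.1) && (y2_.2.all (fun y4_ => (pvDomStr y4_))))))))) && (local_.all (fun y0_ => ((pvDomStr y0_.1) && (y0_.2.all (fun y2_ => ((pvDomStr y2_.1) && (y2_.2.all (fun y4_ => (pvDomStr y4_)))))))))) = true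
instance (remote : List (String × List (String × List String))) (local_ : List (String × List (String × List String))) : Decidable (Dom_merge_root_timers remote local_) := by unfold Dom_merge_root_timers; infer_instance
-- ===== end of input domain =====

-- B replaces A's three fixed-depth mutation loops with a recursive per-level deep merge
-- (common keys merged by recursion / set union, the right operand's new keys appended);
-- alternative decomposition, no speed claim. Neither program mutates its arguments.

-- shared dict primitives, exact Python dict semantics on the association-list encoding
-- (first-match lookup; insert overwrites in place, new keys append at the end):
def pvGet? {α : Type} (d : List (String × α)) (k : String) : Option α :=
  match d with
  | [] => none
  | p :: rest => if p.1 = k then some p.2 else pvGet? rest k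

def pvIns {α : Type} (d : List (String × α)) (k : String) (v : α) : List (String × α) :=
  match d with
  | [] => [(k, v)]
  | p :: rest => if p.1 = k then (k, v) :: rest else p :: pvIns rest k v

-- ===== PORT A =====
-- inner loop: for name, devs in timers.items(): dst[name].update(devs)   (dst a defaultdict(set))
def pvAInner (dst : List (String × List String)) (timers : List (String × List String)) : List (String × List String) :=
  timers.foldl (fun d nd =>
    pvIns d nd.1 (PySem.Set.update ((pvGet? d nd.1).getD PySem.Set.empty) nd.2)) dst

def merge_root_timers (remote : List (String × List (String × List String))) (local_ : List (String × List (String × List String))) : List (String × List (String × List String)) :=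
  [remote, local_].foldl (fun merged src =>
    src.foldl (fun merged rt =>
      -- dst = merged.setdefault(root, defaultdict(set)); mutations to dst land back at root's slot
      let dst := (pvGet? merged rt.1).getD []
      pvIns merged rt.1 (pvAInner dst rt.2)) merged) []

-- ===== PORT B =====
def pvCopySet (v : List String) : List String := PySem.Set.ofList v          -- set(v)

def pvCopyTimers (v : List (String × List String)) : List (String × List String) :=
  v.map (fun p => (p.1, pvCopySet p.2))                                      -- _copy of a timers dict

def pvMergeSets (x y : List String) : List String :=
  PySem.Set.union (PySem.Set.ofList x) y                                     -- set(x) | y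

-- _deep_merge at the timers level (loop over a merging, then loop over b appending new keys)
def pvMergeTimers (a b : List (String × List String)) : List (String × List String) :=
  (a.map (fun p =>
    match pvGet? b p.1 with
    | some w => (p.1, pvMergeSets p.2 w)
    | none => (p.1, pvCopySet p.2)))
  ++ ((b.filter (fun q => (pvGet? a q.1).isNone)).map (fun q => (q.1, pvCopySet q.2)))

-- _deep_merge at the root level
def merge_root_timers_alt (remote : List (String × List (String × List String))) (local_ : List (String × List (String × List String))) : List (String × List (String × List String)) :=
  (remote.map (fun p =>
    match pvGet? local_ p.1 with
    | some w => (p.1, pvMergeTimers p.2 w)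
    | none => (p.1, pvCopyTimers p.2)))
  ++ ((local_.filter (fun q => (pvGet? remote q.1).isNone)).map (fun q => (q.1, pvCopyTimers q.2)))

-- ===== PRECONDITION & SPEC =====
-- Pre_ only pins the encoding: the association lists must have distinct keys at both dict
-- levels, i.e. actually represent Python dicts (a duplicate-key list is not a Python dict,
-- so no Python-representable input is excluded).
def Pre_merge_root_timers (remote : List (String × List (String × List String))) (local_ : List (String × List (String × List String))) : Prop :=
  (remote.map Prod.fst).Nodup ∧ (local_.map Prod.fst).Nodup ∧
  (∀ p ∈ remote, (p.2.map Prod.fst).Nodup) ∧ (∀ p ∈ local_, (p.2.map Prod.fst).Nodup)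

instance (remote : List (String × List (String × List String))) (local_ : List (String × List (String × List String))) : Decidable (Pre_merge_root_timers remote local_) := by unfold Pre_merge_root_timers; infer_instance

def pvWitness_merge_root_timers : (List (String × List (String × List String))) × (List (String × List (String × List String))) :=
  ([("a", [("t", ["d1", "d2"])]), ("b", [])], [("a", [("t", ["d2", "d3"]), ("u", [])]), ("c", [("t", ["d1"])])])

def Spec_merge_root_timers (remote : List (String × List (String × List String))) (local_ : List (String × List (String × List String))) (out : List (String × List (String × List String))) : Prop := out = merge_root_timers_alt remote local_
instance (remote : List (String × List (String × List String))) (local_ : List (String × List (String × List String))) (out : List (String × List (String × List String))) : Decidable (Spec_merge_root_timers remote local_ out) := by unfold Spec_merge_root_timers; infer_instance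

-- ===== CLAIM (what is proved, stated in full; the proofs are below) =====
def Claim_equal_merge_root_timers : Prop := ∀ (remote : List (String × List (String × List String))) (local_ : List (String × List (String × List String))), Dom_merge_root_timers remote local_ → Pre_merge_root_timers remote local_ → Spec_merge_root_timers remote local_ (merge_root_timers remote local_)

-- ===== LEMMAS AND PROOFS =====

-- generic shape of A's two dict-merging loops: fold a source dict into an accumulator,
-- combining each incoming value with the accumulator's entry (default dflt)
def pvMF {ν μ : Type} (c : ν → μ → ν) (dflt : ν) (d : List (String × ν)) (src : List (String × μ)) : List (String × ν) :=
  src.foldl (fun d p => pvIns d p.1 (c ((pvGet? d p.1).getD dflt) p.2)) d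

theorem pvGet?_eq_none_iff {α : Type} (d : List (String × α)) (k : String) :
    pvGet? d k = none ↔ k ∉ d.map Prod.fst := by
  induction d with
  | nil => simp [pvGet?]
  | cons p rest ih =>
    by_cases h : p.1 = k
    · subst h; simp [pvGet?]
    · simp [pvGet?, h, ih, Ne.symm h]

theorem pvGet?_append {α : Type} (d e : List (String × α)) (k : String) :
    pvGet? (d ++ e) k = ((pvGet? d k).or (pvGet? e k)) := by
  induction d with
  | nil => simp [pvGet?]
  | cons p rest ih => by_cases h : p.1 = k <;> simp [pvGet?, h, ih]

theorem pvGet?_mem {α : Type} (d : List (String × α)) (k : String) (v : α)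
    (h : pvGet? d k = some v) : (k, v) ∈ d := by
  induction d with
  | nil => simp [pvGet?] at h
  | cons p rest ih =>
    by_cases hp : p.1 = k
    · simp [pvGet?, hp] at h
      have : (k, v) = p := by rw [← hp, ← h]
      rw [this]
      exact List.mem_cons_self
    · simp [pvGet?, hp] at h
      exact List.mem_cons_of_mem _ (ih h)

theorem pvGet?_unique {α : Type} : ∀ (d : List (String × α)) (k : String) (v : α),
    (d.map Prod.fst).Nodup → pvGet? d k = some v →
    ∀ p ∈ d, p.1 = k → p.2 = v := by
  intro d
  induction d with
  | nil => intro k v _ h; simp [pvGet?] at h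
  | cons q rest ih =>
    intro k v hnd h p hp hpk
    simp only [List.map_cons, List.nodup_cons] at hnd
    by_cases hq : q.1 = k
    · have hv : q.2 = v := by simpa [pvGet?, hq] using h
      rcases List.mem_cons.mp hp with rfl | hp'
      · exact hv
      · exfalso
        apply hnd.1
        rw [hq, ← hpk]
        exact List.mem_map_of_mem hp'
    · have h' : pvGet? rest k = some v := by simpa [pvGet?, hq] using h
      rcases List.mem_cons.mp hp with rfl | hp'
      · exact absurd hpk hq
      · exact ih k v hnd.2 h' p hp' hpk

theorem pvIns_absent {α : Type} (d : List (String × α)) (k : String) (v : α)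
    (h : pvGet? d k = none) : pvIns d k v = d ++ [(k, v)] := by
  induction d with
  | nil => simp [pvIns]
  | cons p rest ih =>
    by_cases hp : p.1 = k
    · simp [pvGet?, hp] at h
    · simp [pvGet?, hp] at h
      simp [pvIns, hp, ih h]

theorem pvIns_present {α : Type} (d : List (String × α)) (k : String) (v w : α)
    (hnd : (d.map Prod.fst).Nodup) (h : pvGet? d k = some w) :
    pvIns d k v = d.map (fun p => if p.1 = k then (k, v) else p) := by
  induction d with
  | nil => simp [pvGet?] at h
  | cons p rest ih =>
    simp only [List.map_cons, List.nodup_cons] at hnd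
    by_cases hp : p.1 = k
    · simp only [pvIns, if_pos hp, List.map_cons]
      congr 1
      have hfix : ∀ q ∈ rest, (if q.1 = k then ((k, v) : String × α) else q) = q := by
        intro q hq
        have hqk : q.1 ≠ k := by
          intro e
          apply hnd.1
          rw [hp, ← e]
          exact List.mem_map_of_mem hq
        simp [hqk]
      have h2 : rest.map (fun p => if p.1 = k then ((k, v) : String × α) else p) = rest := by
        simpa using List.map_congr_left hfix
      exact h2.symm
    · simp [pvGet?, hp] at h
      simp [pvIns, hp, ih hnd.2 h]

-- a key-preserving map does not change which keys a lookup finds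
theorem pvGet?_map_keyfix {α β : Type} (f : String × α → String × β)
    (hf : ∀ p, (f p).1 = p.1) (d : List (String × α)) (k : String) :
    (pvGet? (d.map f) k).isNone = (pvGet? d k).isNone := by
  induction d with
  | nil => simp [pvGet?]
  | cons p rest ih =>
    by_cases h : p.1 = k <;> simp [pvGet?, hf, h, ih]

theorem map_fst_map_keyfix {α β : Type} (f : String × α → String × β)
    (hf : ∀ p, (f p).1 = p.1) (d : List (String × α)) :
    (d.map f).map Prod.fst = d.map Prod.fst := by
  simp [List.map_map, Function.comp_def, hf]

-- MAIN LEMMA: folding a nodup source dict into a nodup accumulator = merge existing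
-- entries in place, then append the source's fresh keys in order
theorem pvMF_eq {ν μ : Type} (c : ν → μ → ν) (dflt : ν) :
    ∀ (src : List (String × μ)) (d : List (String × ν)),
      (src.map Prod.fst).Nodup → (d.map Prod.fst).Nodup →
      pvMF c dflt d src =
        d.map (fun p =>
          match pvGet? src p.1 with
          | some x => (p.1, c p.2 x)
          | none => p)
        ++ ((src.filter (fun q => (pvGet? d q.1).isNone)).map (fun q => (q.1, c dflt q.2))) := by
  intro src
  induction src with
  | nil =>
    intro d _ _
    simp [pvMF, pvGet?]
  | cons nx rest ih =>
    intro d hsrc hd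
    obtain ⟨n, x⟩ := nx
    simp only [List.map_cons, List.nodup_cons] at hsrc
    have hnrest : n ∉ rest.map Prod.fst := hsrc.1
    have hrest : (rest.map Prod.fst).Nodup := hsrc.2
    have hstep : pvMF c dflt d ((n, x) :: rest)
        = pvMF c dflt (pvIns d n (c ((pvGet? d n).getD dflt) x)) rest := by
      simp [pvMF, List.foldl_cons]
    by_cases h : (pvGet? d n).isNone
    · -- n is a fresh key: the entry is appended
      have hnone : pvGet? d n = none := Option.isNone_iff_eq_none.mp h
      have hnotin : n ∉ d.map Prod.fst := (pvGet?_eq_none_iff d n).mp hnone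
      set w := c ((pvGet? d n).getD dflt) x with hw
      have hwd : w = c dflt x := by rw [hw, hnone]; rfl
      have hins : pvIns d n w = d ++ [(n, w)] := pvIns_absent d n w hnone
      have hd' : ((d ++ [(n, w)]).map Prod.fst).Nodup := by
        simp only [List.map_append, List.map_cons, List.map_nil]
        refine List.Nodup.append hd (List.nodup_singleton n) ?_
        intro a ha hb
        simp only [List.mem_singleton] at hb
        subst hb
        exact hnotin ha
      rw [hstep, hins, ih _ hrest hd']
      have hmap : (d ++ [(n, w)]).map (fun p =>
          match pvGet? rest p.1 with
          | some x => (p.1, c p.2 x)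
          | none => p)
          = d.map (fun p =>
              match pvGet? ((n, x) :: rest) p.1 with
              | some x => (p.1, c p.2 x)
              | none => p) ++ [(n, w)] := by
        rw [List.map_append]
        congr 1
        · apply List.map_congr_left
          intro p hp
          have hpn : p.1 ≠ n := fun e => hnotin (e ▸ List.mem_map_of_mem hp)
          have : pvGet? ((n, x) :: rest) p.1 = pvGet? rest p.1 := by
            simp [pvGet?, Ne.symm hpn]
          rw [this]
        · have : pvGet? rest n = none := (pvGet?_eq_none_iff rest n).mpr hnrest
          simp [this]
      have hfil : rest.filter (fun q => (pvGet? (d ++ [(n, w)]) q.1).isNone)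
          = rest.filter (fun q => (pvGet? d q.1).isNone) := by
        apply List.filter_congr
        intro q hq
        have hqn : q.1 ≠ n := fun e => hnrest (e ▸ List.mem_map_of_mem hq)
        rw [pvGet?_append]
        have : pvGet? [(n, w)] q.1 = none := by simp [pvGet?, Ne.symm hqn]
        simp [this]
      have hhead : ((n, x) :: rest).filter (fun q => (pvGet? d q.1).isNone)
          = (n, x) :: rest.filter (fun q => (pvGet? d q.1).isNone) := by
        simp [hnone]
      rw [hmap, hfil, hhead]
      simp [hwd]
    · -- n already present: overwrite in place
      obtain ⟨v0, hv0⟩ : ∃ v0, pvGet? d n = some v0 := by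
        cases hv : pvGet? d n with
        | none => exact absurd (by simp [hv]) h
        | some v0 => exact ⟨v0, rfl⟩
      set w := c ((pvGet? d n).getD dflt) x with hw
      have hwd : w = c v0 x := by rw [hw, hv0]; rfl
      have hins : pvIns d n w = d.map (fun p => if p.1 = n then (n, w) else p) :=
        pvIns_present d n w v0 hd hv0
      have hkeys : ((d.map (fun p => if p.1 = n then (n, w) else p)).map Prod.fst).Nodup := by
        rw [map_fst_map_keyfix _ (fun p => by by_cases e : p.1 = n <;> simp [e])]
        exact hd
      rw [hstep, hins, ih _ hrest hkeys]
      have hmap : (d.map (fun p => if p.1 = n then (n, w) else p)).map (fun p =>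
          match pvGet? rest p.1 with
          | some x => (p.1, c p.2 x)
          | none => p)
          = d.map (fun p =>
              match pvGet? ((n, x) :: rest) p.1 with
              | some x => (p.1, c p.2 x)
              | none => p) := by
        rw [List.map_map]
        apply List.map_congr_left
        intro p hp
        by_cases hpn : p.1 = n
        · have hp2 : p.2 = v0 := pvGet?_unique d n v0 hd hv0 p hp hpn
          have hrn : pvGet? rest n = none := (pvGet?_eq_none_iff rest n).mpr hnrest
          simp only [Function.comp_apply, if_pos hpn]
          have : pvGet? ((n, x) :: rest) p.1 = some x := by simp [pvGet?, hpn]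
          rw [this]
          simp [hrn, hwd, hpn, hp2]
        · have hne : ¬ n = p.1 := fun e => hpn e.symm
          have : pvGet? ((n, x) :: rest) p.1 = pvGet? rest p.1 := by
            simp [pvGet?, hne]
          simp only [Function.comp_apply, if_neg hpn, this]
      have hfil : rest.filter (fun q =>
            (pvGet? (d.map (fun p => if p.1 = n then (n, w) else p)) q.1).isNone)
          = rest.filter (fun q => (pvGet? d q.1).isNone) := by
        apply List.filter_congr
        intro q hq
        rw [pvGet?_map_keyfix _ (fun p => by by_cases e : p.1 = n <;> simp [e])]
      have hhead : ((n, x) :: rest).filter (fun q => (pvGet? d q.1).isNone)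
          = rest.filter (fun q => (pvGet? d q.1).isNone) := by
        simp [hv0]
      rw [hmap, hfil, hhead]

-- A's inner loop seen as pvMF
theorem pvAInner_eq_pvMF (dst timers : List (String × List String)) :
    pvAInner dst timers = pvMF (fun s ds => PySem.Set.update s ds) [] dst timers := rfl

-- A's whole body seen as two pvMF passes
theorem merge_eq_pvMF (remote local_ : List (String × List (String × List String))) :
    merge_root_timers remote local_
      = pvMF (fun cur ts => pvAInner cur ts) []
          (pvMF (fun cur ts => pvAInner cur ts) [] [] remote) local_ := rfl

-- the first pass over a fresh accumulator deep-copies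
theorem pvAInner_nil (ts : List (String × List String))
    (h : (ts.map Prod.fst).Nodup) : pvAInner [] ts = pvCopyTimers ts := by
  rw [pvAInner_eq_pvMF, pvMF_eq _ _ ts [] h (by simp)]
  simp only [List.map_nil, List.nil_append]
  have : ts.filter (fun q => (pvGet? ([] : List (String × List String)) q.1).isNone) = ts := by
    simp [pvGet?]
  rw [this, pvCopyTimers]
  apply List.map_congr_left
  intro q _
  simp [pvCopySet, PySem.Set.update, PySem.Set.ofList_eq_foldl]

-- updating a deep copy of a = the recursive merge of B
theorem pvAInner_merge (a b : List (String × List String))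
    (ha : (a.map Prod.fst).Nodup) (hb : (b.map Prod.fst).Nodup) :
    pvAInner (pvCopyTimers a) b = pvMergeTimers a b := by
  have hkf : ∀ p : String × List String, ((p.1, pvCopySet p.2) : String × List String).1 = p.1 :=
    fun p => rfl
  have hkeys : ((pvCopyTimers a).map Prod.fst).Nodup := by
    rw [pvCopyTimers, map_fst_map_keyfix _ hkf]
    exact ha
  rw [pvAInner_eq_pvMF, pvMF_eq _ _ b (pvCopyTimers a) hb hkeys, pvMergeTimers]
  congr 1
  · rw [pvCopyTimers, List.map_map]
    apply List.map_congr_left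
    intro p _
    cases hg : pvGet? b p.1 with
    | none => simp [Function.comp_apply, hg]
    | some w =>
      simp only [Function.comp_apply, hg]
      simp [pvMergeSets, PySem.Set.union, pvCopySet]
  · have : b.filter (fun q => (pvGet? (pvCopyTimers a) q.1).isNone)
        = b.filter (fun q => (pvGet? a q.1).isNone) := by
      apply List.filter_congr
      intro q _
      rw [pvCopyTimers, pvGet?_map_keyfix _ hkf]
    rw [this]
    apply List.map_congr_left
    intro q _
    simp [pvCopySet, PySem.Set.update, PySem.Set.ofList_eq_foldl]

-- ===== VERDICT (by name: the statement is the Claim_ definition above) =====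
theorem merge_root_timers_spec : Claim_equal_merge_root_timers := by
  intro remote local_ _ hpre
  obtain ⟨hr, hl, hrt, hlt⟩ := hpre
  show merge_root_timers remote local_ = merge_root_timers_alt remote local_
  rw [merge_eq_pvMF]
  -- first pass: the remote dict is deep-copied into the fresh accumulator
  have h1 : pvMF (fun cur ts => pvAInner cur ts) [] [] remote
      = remote.map (fun q => (q.1, pvCopyTimers q.2)) := by
    rw [pvMF_eq _ _ remote [] hr (by simp)]
    simp only [List.map_nil, List.nil_append]
    have : remote.filter (fun q =>
        (pvGet? ([] : List (String × List (String × List String))) q.1).isNone) = remote := by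
      simp [pvGet?]
    rw [this]
    apply List.map_congr_left
    intro q hq
    rw [pvAInner_nil q.2 (hrt q hq)]
  rw [h1]
  -- second pass: merge the local dict into that copy
  have hkf : ∀ p : String × List (String × List String),
      ((p.1, pvCopyTimers p.2) : String × List (String × List String)).1 = p.1 := fun p => rfl
  have hkeys : ((remote.map (fun q => (q.1, pvCopyTimers q.2))).map Prod.fst).Nodup := by
    rw [map_fst_map_keyfix _ hkf]
    exact hr
  rw [pvMF_eq _ _ local_ _ hl hkeys, merge_root_timers_alt]
  congr 1
  · rw [List.map_map]
    apply List.map_congr_left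
    intro p hp
    cases hg : pvGet? local_ p.1 with
    | none => simp [Function.comp_apply, hg]
    | some w =>
      simp only [Function.comp_apply, hg]
      have hw : (p.1, w) ∈ local_ := pvGet?_mem local_ p.1 w hg
      rw [pvAInner_merge p.2 w (hrt p hp) (hlt (p.1, w) hw)]
  · have : local_.filter (fun q =>
        (pvGet? (remote.map (fun q => (q.1, pvCopyTimers q.2))) q.1).isNone)
        = local_.filter (fun q => (pvGet? remote q.1).isNone) := by
      apply List.filter_congr
      intro q _
      rw [pvGet?_map_keyfix _ hkf]
    rw [this]
    apply List.map_congr_left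
    intro q hq
    rw [pvAInner_nil q.2 (hlt q (List.mem_filter.mp hq).1)]
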